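-- pv_equiv track=rewrite | github.com/cnthornton/envclust | envclust/envcluster.py | table_counts
-- ===== SOURCE A (Python) =====
-- def table_counts(contingency_table):
--     """Obtain summary information about contingency table created from \
--     candidate and representative distributions.
--     """
--     num_rows = len(contingency_table)
--     num_columns = len(contingency_table[0])
--
--     row_sums = [sum(row) for row in contingency_table]
--
--     column_sums = []
--     for c in range(num_columns):
--         col_total = 0
--         for r in range(num_rows):
--             col_total += contingency_table[r][c]
--         column_sums.append(col_total)
--
--     table_total = sum(row_sums)
--
--     return num_rows, num_columns, table_total, row_sums, column_sums
-- ===== SOURCE B (Python) =====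
-- def table_counts(contingency_table):
--     """Obtain summary information about contingency table created from \
--     candidate and representative distributions.
--     """
--     num_rows = len(contingency_table)
--     num_columns = len(contingency_table[0])
--
--     row_sums = []
--     column_sums = [0] * num_columns
--     table_total = 0
--     for row in contingency_table:
--         s = sum(row)
--         row_sums.append(s)
--         table_total += s
--         for c in range(num_columns):
--             column_sums[c] += row[c]
--
--     return num_rows, num_columns, table_total, row_sums, column_sums
-- ===== Notes on version B (the rewrite author's own statement) =====
-- stated objective: alternative
-- what changed: Replaced A's three separate passes (row-sum comprehension, column-major nested index loop, final sum) by one fused row-major pass that maintains row_sums, column_sums and table_total together.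
import Mathlib
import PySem

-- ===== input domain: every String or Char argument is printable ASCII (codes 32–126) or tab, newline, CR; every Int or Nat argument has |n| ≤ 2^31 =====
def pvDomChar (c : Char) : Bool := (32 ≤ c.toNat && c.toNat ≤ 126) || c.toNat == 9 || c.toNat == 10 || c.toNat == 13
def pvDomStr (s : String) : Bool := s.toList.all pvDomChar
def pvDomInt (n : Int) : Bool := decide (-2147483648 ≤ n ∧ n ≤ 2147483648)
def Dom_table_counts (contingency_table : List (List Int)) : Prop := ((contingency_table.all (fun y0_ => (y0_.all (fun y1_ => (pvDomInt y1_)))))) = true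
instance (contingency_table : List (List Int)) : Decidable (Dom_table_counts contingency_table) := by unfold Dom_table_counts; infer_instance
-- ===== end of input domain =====

-- B fuses A's three passes (row-sum comprehension, column-major nested loop, final total) into one row-major pass.

-- ===== PORT A =====
def table_counts (contingency_table : List (List Int)) : Int × Int × Int × List Int × List Int :=
  let num_rows : Int := contingency_table.length
  let num_columns : Int := ((PySem.List.pyGetD contingency_table 0 []).length : Int)
  let row_sums : List Int := contingency_table.map (fun row => row.sum)
  let column_sums : List Int := (PySem.List.pyRange 0 num_columns 1).map (fun c =>
    (PySem.List.pyRange 0 num_rows 1).foldl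
      (fun col_total r => col_total + PySem.List.pyGetD (PySem.List.pyGetD contingency_table r []) c 0) 0)
  let table_total : Int := row_sums.sum
  (num_rows, num_columns, table_total, row_sums, column_sums)

-- ===== PORT B =====
-- one fused pass over the rows; state = (row_sums, column_sums, table_total)
def table_counts_alt (contingency_table : List (List Int)) : Int × Int × Int × List Int × List Int :=
  let num_rows : Int := contingency_table.length
  let num_columns : Int := ((PySem.List.pyGetD contingency_table 0 []).length : Int)
  let fin : List Int × List Int × Int :=
    contingency_table.foldl
      (fun st row =>
        let s := row.sum
        (st.1 ++ [s],
         st.2.1.mapIdx (fun c v => v + PySem.List.pyGetD row (c : Int) 0),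
         st.2.2 + s))
      ([], List.replicate (PySem.List.pyGetD contingency_table 0 []).length 0, 0)
  (num_rows, num_columns, fin.2.2, fin.1, fin.2.1)

-- ===== PRECONDITION & SPEC =====
-- A raises IndexError on an empty table (contingency_table[0]) and on any row shorter than the
-- first row (contingency_table[r][c]); B raises on exactly the same inputs, so Pre_ excludes them.
def Pre_table_counts (contingency_table : List (List Int)) : Prop :=
  contingency_table ≠ [] ∧
    ∀ row ∈ contingency_table, (contingency_table.headD []).length ≤ row.length
instance (contingency_table : List (List Int)) : Decidable (Pre_table_counts contingency_table) := by unfold Pre_table_counts; infer_instance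

def pvWitness_table_counts : List (List Int) := [[1, 2], [3, 4]]

def Spec_table_counts (contingency_table : List (List Int)) (out : Int × Int × Int × List Int × List Int) : Prop := out = table_counts_alt contingency_table
instance (contingency_table : List (List Int)) (out : Int × Int × Int × List Int × List Int) : Decidable (Spec_table_counts contingency_table out) := by unfold Spec_table_counts; infer_instance

-- ===== CLAIM (what is proved, stated in full; the proofs are below) =====
def Claim_equal_table_counts : Prop := ∀ (contingency_table : List (List Int)), Dom_table_counts contingency_table → Pre_table_counts contingency_table → Spec_table_counts contingency_table (table_counts contingency_table)

-- ===== LEMMAS AND PROOFS =====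

-- column sum of a list of rows at column k (Nat index, default 0)
def pvColSum (rows : List (List Int)) (k : Nat) : Int :=
  (rows.map (fun row => row.getD k 0)).sum

theorem pvMapIdx_id (cs : List Int) : List.mapIdx (fun _ v => v) cs = cs := by
  induction cs using List.reverseRecOn with
  | nil => rfl
  | append_singleton xs x ih => simp [List.mapIdx_append, ih]

theorem pvColSum_cons (row : List Int) (rows : List (List Int)) (k : Nat) :
    pvColSum (row :: rows) k = row.getD k 0 + pvColSum rows k := by
  simp [pvColSum]

-- B's fold characterised
theorem pvBfold (rows : List (List Int)) (rs cs : List Int) (tot : Int) :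
    rows.foldl
      (fun st row =>
        let s := row.sum
        (st.1 ++ [s],
         st.2.1.mapIdx (fun c v => v + PySem.List.pyGetD row (c : Int) 0),
         st.2.2 + s)) (rs, cs, tot)
    = (rs ++ rows.map (fun row => row.sum),
       cs.mapIdx (fun k v => v + pvColSum rows k),
       tot + (rows.map (fun row => row.sum)).sum) := by
  induction rows generalizing rs cs tot with
  | nil => simp [pvColSum, pvMapIdx_id]
  | cons row rows ih =>
      simp only [List.foldl_cons, List.map_cons, List.sum_cons, ih, Prod.mk.injEq]
      refine ⟨by simp, ?_, by ring⟩
      rw [List.mapIdx_mapIdx]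
      congr 1
      funext k v
      simp [pvColSum_cons]
      ring

theorem pvFoldlColSum (k : Nat) (rows : List (List Int)) (init : Int) :
    rows.foldl (fun a row => a + row.getD k 0) init = init + pvColSum rows k := by
  induction rows generalizing init with
  | nil => simp [pvColSum]
  | cons row rows ih => rw [List.foldl_cons, ih, pvColSum_cons]; ring

-- ===== VERDICT (by name: the statement is the Claim_ definition above) =====
theorem table_counts_spec : Claim_equal_table_counts := by
  intro t _ _
  show table_counts t = table_counts_alt t
  simp only [table_counts, table_counts_alt, pvBfold, Prod.mk.injEq]
  refine ⟨trivial, trivial, by simp, by simp, ?_⟩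
  -- column sums: A's column-major nested loop equals B's mapIdx over the fused fold
  rw [PySem.List.pyGetD_zero]
  apply List.ext_getElem
  · simp [PySem.List.length_pyRange_one]
  intro k h1 h2
  simp only [List.getElem_map, PySem.List.getElem_pyRange_one, List.getElem_mapIdx,
    List.getElem_replicate]
  rw [show (0 : Int) + (k : Int) = ((k : Nat) : Int) by simp]
  rw [PySem.List.foldl_pyRange_zero_pyGetD' t ([] : List Int)
    (fun col_total row => col_total + PySem.List.pyGetD row ((k : Nat) : Int) 0) 0]
  simp only [PySem.List.pyGetD_natCast]
  rw [pvFoldlColSum]
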